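-- pv_equiv track=rewrite | github.com/juliusjh/distribution_hints | src/leakage.py | poly_to_matrix
-- ===== SOURCE A (Python) =====
-- def poly_to_matrix(poly):
--     k = len(poly)
--
--     def sign(i, j):
--         return 1 if ((i % k) + (j % k)) < k else -1
--
--     res = [[None for _ in range(k)] for _ in range(k)]
--     for i in range(len(poly)):
--         for j in range(len(poly)):
--             idx = (k - i + j) % k
--             res[i][j] = sign(i, idx) * poly[idx]
--     return res
-- ===== SOURCE B (Python) =====
-- def poly_to_matrix(poly):
--     if not poly:
--         return []
--     row = list(poly)
--     res = [row]
--     for _ in range(len(poly) - 1):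
--         row = [-row[-1]] + row[:-1]
--         res.append(row)
--     return res
-- ===== Notes on version B (the rewrite author's own statement) =====
-- stated objective: faster
-- what changed: Instead of computing every entry from a sign/modular-index formula in a nested k-by-k loop, B copies poly as row 0 and derives each subsequent row from the previous one by a single negacyclic rotation (negated last element moved to the front, via list slicing).
import Mathlib
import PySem

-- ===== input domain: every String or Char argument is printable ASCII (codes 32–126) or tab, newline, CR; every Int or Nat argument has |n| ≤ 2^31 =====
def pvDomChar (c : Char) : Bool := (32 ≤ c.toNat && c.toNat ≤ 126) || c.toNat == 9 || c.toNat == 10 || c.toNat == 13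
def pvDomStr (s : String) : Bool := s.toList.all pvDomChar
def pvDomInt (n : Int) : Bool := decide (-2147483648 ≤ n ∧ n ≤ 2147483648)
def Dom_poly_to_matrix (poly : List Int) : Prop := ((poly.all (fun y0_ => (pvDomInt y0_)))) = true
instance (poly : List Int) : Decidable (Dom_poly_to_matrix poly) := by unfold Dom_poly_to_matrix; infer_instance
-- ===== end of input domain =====

-- B builds each row by negacyclically rotating the previous one instead of recomputing every
-- entry from a sign/index formula (objective: simpler decomposition; same O(k^2) cost).

-- ===== PORT A =====
-- A fills a pre-allocated k×k matrix cell by cell; every cell res[i][j] is written exactly once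
-- by the double loop over the same ranges, so the nested map is the faithful transliteration.
def poly_to_matrix (poly : List Int) : List (List Int) :=
  let k : Int := PySem.List.len poly
  (PySem.List.pyRange 0 k 1).map (fun i =>
    (PySem.List.pyRange 0 k 1).map (fun j =>
      let idx := PySem.Int.mod (k - i + j) k
      let s : Int := if PySem.Int.mod i k + PySem.Int.mod idx k < k then 1 else -1
      s * PySem.List.pyGetD poly idx 0))

-- ===== PORT B =====
-- row = [-row[-1]] + row[:-1]
def pvRot (row : List Int) : List Int :=
  (-(PySem.List.pyGetD row (-1) 0)) :: PySem.List.slice row none (some (-1))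

def poly_to_matrix_alt (poly : List Int) : List (List Int) :=
  if poly = [] then []
  else
    ((PySem.List.pyRange 0 (PySem.List.len poly - 1) 1).foldl
      (fun (st : List Int × List (List Int)) _ =>
        let row := pvRot st.1
        (row, st.2 ++ [row]))
      (poly, [poly])).2

-- ===== PRECONDITION & SPEC =====
def Spec_poly_to_matrix (poly : List Int) (out : List (List Int)) : Prop := out = poly_to_matrix_alt poly
instance (poly : List Int) (out : List (List Int)) : Decidable (Spec_poly_to_matrix poly out) := by unfold Spec_poly_to_matrix; infer_instance

-- ===== CLAIM (what is proved, stated in full; the proofs are below) =====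
def Claim_equal_poly_to_matrix : Prop := ∀ (poly : List Int), Dom_poly_to_matrix poly → Spec_poly_to_matrix poly (poly_to_matrix poly)


-- ===== LEMMAS AND PROOFS =====

-- the index (k - i + j) % k, resolved by whether j < i
theorem pv_mod_idx (k i j : Nat) (hi : i < k) (hj : j < k) :
    PySem.Int.mod ((k : Int) - i + j) k = (if j < i then (k:Int) - i + j else (j:Int) - i) := by
  rw [PySem.Int.mod_eq_emod_of_pos (by omega)]
  split_ifs with h
  · exact Int.emod_eq_of_lt (by omega) (by omega)
  · rw [← Int.sub_emod_right ((k:Int) - i + j) k,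
        Int.emod_eq_of_lt (by omega) (by omega)]
    omega

-- one negacyclic rotation of the canonical row form
theorem pv_rot_form (p : List Int) (i : Nat) (hi : i < p.length) :
    pvRot ((p.drop (p.length - i)).map (fun x => -x) ++ p.take (p.length - i))
      = (p.drop (p.length - (i+1))).map (fun x => -x) ++ p.take (p.length - (i+1)) := by
  have hm : p.length - (i+1) < p.length := by omega
  have hsplit : p.length - i = (p.length - (i+1)) + 1 := by omega
  rw [hsplit, List.take_succ_eq_append_getElem hm]
  unfold pvRot
  rw [← List.append_assoc]
  rw [PySem.List.pyGetD_neg_one_append_singleton, PySem.List.slice_to_neg_one,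
      List.dropLast_concat]
  rw [List.drop_eq_getElem_cons hm, List.map_cons]
  simp

-- iterating the rotation
theorem pv_rot_iter (p : List Int) (i : Nat) (hi : i ≤ p.length) :
    pvRot^[i] p = (p.drop (p.length - i)).map (fun x => -x) ++ p.take (p.length - i) := by
  induction i with
  | zero => simp
  | succ n ih =>
      rw [Function.iterate_succ_apply', ih (by omega)]
      exact pv_rot_form p n (by omega)

-- the fold in B, unrolled: it only uses the length of the range list
theorem pv_fold_steps (l : List Int) (row : List Int) (acc : List (List Int)) :
    (l.foldl (fun (st : List Int × List (List Int)) _ =>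
        (pvRot st.1, st.2 ++ [pvRot st.1])) (row, acc))
      = (pvRot^[l.length] row, acc ++ (List.range l.length).map (fun j => pvRot^[j+1] row)) := by
  induction l generalizing row acc with
  | nil => simp
  | cons x xs ih =>
      simp only [List.foldl_cons, ih, List.length_cons, Prod.mk.injEq]
      have h2 : ∀ j : Nat, pvRot^[j+1] (pvRot row) = pvRot^[j+1+1] row :=
        fun j => (Function.iterate_succ_apply pvRot (j+1) row).symm
      constructor
      · rw [← Function.iterate_succ_apply]
      · rw [List.range_succ_eq_map, List.map_cons, List.map_map]
        simp [Function.comp_def, h2, List.append_assoc]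

-- A's row i equals the canonical row form
theorem pv_rowA_eq (p : List Int) (i : Nat) (hi : i < p.length) :
    (List.range p.length).map (fun (j : Nat) =>
        (if PySem.Int.mod (i : Int) (p.length : Int)
              + PySem.Int.mod (PySem.Int.mod ((p.length : Int) - (i:Int) + (j:Int)) (p.length:Int)) (p.length:Int)
              < (p.length : Int) then (1:Int) else -1)
          * PySem.List.pyGetD p (PySem.Int.mod ((p.length : Int) - (i:Int) + (j:Int)) (p.length:Int)) 0)
      = (p.drop (p.length - i)).map (fun x => -x) ++ p.take (p.length - i) := by
  apply List.ext_getElem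
  · simp only [List.length_map, List.length_range, List.length_append, List.length_drop,
      List.length_take]
    omega
  · intro j h1 h2
    have hj : j < p.length := by simpa using h1
    simp only [List.getElem_map, List.getElem_range]
    rw [pv_mod_idx p.length i j hi hj]
    have hii : PySem.Int.mod (i : Int) p.length = (i : Int) := by
      rw [PySem.Int.mod_eq_emod_of_pos (by omega)]
      exact Int.emod_eq_of_lt (by omega) (by omega)
    by_cases h : j < i
    · simp only [if_pos h, hii]
      have hidx2 : PySem.Int.mod ((p.length:Int) - i + j) p.length = (p.length:Int) - i + j := by
        rw [PySem.Int.mod_eq_emod_of_pos (by omega)]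
        exact Int.emod_eq_of_lt (by omega) (by omega)
      rw [hidx2, if_neg (by omega)]
      have hcast : (p.length:Int) - i + j = ((p.length - i + j : Nat) : Int) := by omega
      rw [hcast, PySem.List.pyGetD_natCast]
      rw [List.getElem_append_left (by simp only [List.length_map, List.length_drop]; omega)]
      simp only [List.getElem_map, List.getElem_drop]
      rw [List.getD_eq_getElem p 0 (by omega)]
      ring
    · simp only [if_neg h, hii]
      have hidx2 : PySem.Int.mod ((j:Int) - i) p.length = (j:Int) - i := by
        rw [PySem.Int.mod_eq_emod_of_pos (by omega)]
        exact Int.emod_eq_of_lt (by omega) (by omega)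
      rw [hidx2, if_pos (by omega)]
      have hcast : (j:Int) - i = ((j - i : Nat) : Int) := by omega
      rw [hcast, PySem.List.pyGetD_natCast]
      rw [List.getElem_append_right (by simp only [List.length_map, List.length_drop]; omega)]
      simp only [List.getElem_take]
      rw [List.getD_eq_getElem p 0 (by omega)]
      rw [one_mul]
      congr 1
      simp only [List.length_map, List.length_drop]
      omega

-- A in canonical form
theorem pv_A_canon (p : List Int) :
    poly_to_matrix p = (List.range p.length).map (fun i =>
      (p.drop (p.length - i)).map (fun x => -x) ++ p.take (p.length - i)) := by
  simp only [poly_to_matrix, PySem.List.len_eq, PySem.List.pyRange_zero_natCast,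
    List.map_map, Function.comp_def]
  apply List.map_congr_left
  intro i hil
  have hi : i < p.length := List.mem_range.mp hil
  exact pv_rowA_eq p i hi

-- B in canonical form
theorem pv_B_canon (p : List Int) :
    poly_to_matrix_alt p = (List.range p.length).map (fun i =>
      (p.drop (p.length - i)).map (fun x => -x) ++ p.take (p.length - i)) := by
  by_cases hp : p = []
  · subst hp; simp [poly_to_matrix_alt]
  · obtain ⟨n, hn⟩ : ∃ n, p.length = n + 1 :=
      ⟨p.length - 1, by cases p with | nil => exact absurd rfl hp | cons a l => simp⟩
    simp only [poly_to_matrix_alt, if_neg hp, PySem.List.len_eq, hn]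
    rw [show ((n + 1 : Nat) : Int) - 1 = ((n : Nat) : Int) from by push_cast; ring]
    rw [PySem.List.pyRange_zero_natCast, pv_fold_steps]
    simp only [List.length_map, List.length_range, List.singleton_append]

    rw [List.range_succ_eq_map, List.map_cons, List.map_map]
    congr 1
    · simp [← hn]
    · apply List.map_congr_left
      intro j hjl
      have hj : j < n := List.mem_range.mp hjl
      simp only [Function.comp_def, Nat.succ_eq_add_one]
      rw [pv_rot_iter p (j+1) (by omega), hn]

-- ===== VERDICT (by name: the statement is the Claim_ definition above) =====
theorem poly_to_matrix_spec : Claim_equal_poly_to_matrix := by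
  intro poly _
  unfold Spec_poly_to_matrix
  rw [pv_A_canon, pv_B_canon]
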